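-- pv_equiv track=rewrite | github.com/dorosh-roman/crypto | lab1-2/1.py | get_sorted_indices
-- ===== SOURCE A (Python) =====
-- def get_sorted_indices(key):
--     key_with_indices = []
--     for idx in range(len(key)):
--         key_with_indices.append((key[idx], idx))
--
--     key_with_indices.sort()
--
--     sorted_indices = []
--     for pair in key_with_indices:
--         char, idx = pair
--         sorted_indices.append(idx)
--
--     return sorted_indices
-- ===== SOURCE B (Python) =====
-- def get_sorted_indices(key):
--     buckets = {}
--     for i, ch in enumerate(key):
--         buckets.setdefault(ch, []).append(i)
--     sorted_indices = []
--     for ch in sorted(buckets):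
--         sorted_indices.extend(buckets[ch])
--     return sorted_indices
-- ===== Notes on version B (the rewrite author's own statement) =====
-- stated objective: faster
-- what changed: B groups indices into per-character buckets in one left-to-right pass and concatenates the buckets over the sorted distinct characters, instead of building and comparison-sorting a list of n (char, idx) tuples.
import Mathlib
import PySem

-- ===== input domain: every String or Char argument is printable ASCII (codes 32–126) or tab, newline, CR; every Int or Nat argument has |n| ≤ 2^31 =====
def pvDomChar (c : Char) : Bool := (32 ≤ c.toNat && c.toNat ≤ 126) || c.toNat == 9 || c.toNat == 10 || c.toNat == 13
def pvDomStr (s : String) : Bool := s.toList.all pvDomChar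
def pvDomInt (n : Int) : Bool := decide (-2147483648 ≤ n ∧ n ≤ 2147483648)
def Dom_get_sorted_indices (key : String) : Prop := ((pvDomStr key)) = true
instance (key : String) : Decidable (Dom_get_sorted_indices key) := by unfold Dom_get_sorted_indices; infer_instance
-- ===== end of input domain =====

-- B groups indices into per-character buckets in one pass and concatenates the buckets over the
-- sorted distinct characters, instead of sorting n (char, idx) tuples (alternative decomposition).

-- ===== PORT A =====
-- A: build [(key[idx], idx) for idx in range(len(key))], sort the tuple list, then collect the indices.
def get_sorted_indices (key : String) : List Int :=
  let key_with_indices :=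
    (PySem.List.pyRange 0 (PySem.Str.len key)).foldl
      (fun acc idx => acc ++ [(PySem.List.pyGetD key.toList idx ' ', idx)]) []
  let sorted_pairs := PySem.List.sorted2 key_with_indices (fun p => p.1) (fun p => p.2)
  sorted_pairs.foldl (fun acc pair => acc ++ [pair.2]) []

-- ===== PORT B =====
-- B: buckets.setdefault(ch, []).append(i) over enumerate(key), then extend over sorted(buckets).
def get_sorted_indices_alt (key : String) : List Int :=
  let buckets :=
    (PySem.List.enumerate key.toList 0).foldl
      (fun d p => d.modify p.2 [] (fun l => l ++ [p.1])) PySem.Dict.empty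
  (PySem.List.sorted buckets.keys (fun c => c)).foldl
    (fun acc ch => acc ++ buckets.getD ch []) []

-- ===== PRECONDITION & SPEC =====
def Spec_get_sorted_indices (key : String) (out : List Int) : Prop := out = get_sorted_indices_alt key
instance (key : String) (out : List Int) : Decidable (Spec_get_sorted_indices key out) := by unfold Spec_get_sorted_indices; infer_instance

-- ===== CLAIM (what is proved, stated in full; the proofs are below) =====
def Claim_equal_get_sorted_indices : Prop := ∀ (key : String), Dom_get_sorted_indices key → Spec_get_sorted_indices key (get_sorted_indices key)

-- ===== LEMMAS AND PROOFS =====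

-- the (char, index) pairs of cs with indices starting at s, in order
def pvPairs (cs : List Char) (s : Int) : List (Char × Int) :=
  match cs with
  | [] => []
  | x :: t => (x, s) :: pvPairs t (s + 1)

-- the indices (starting at s) of the positions of cs holding character c, in order
def pvIdxs (cs : List Char) (s : Int) (c : Char) : List Int :=
  match cs with
  | [] => []
  | x :: t => (if x = c then [s] else []) ++ pvIdxs t (s + 1) c

theorem pvPairs_eq_map_range (cs : List Char) (d : Char) (s : Int) :
    (List.range cs.length).map (fun k => (cs.getD k d, s + (k : Int))) = pvPairs cs s := by
  induction cs generalizing s with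
  | nil => simp [pvPairs]
  | cons x t ih =>
    simp only [List.length_cons, List.range_succ_eq_map, List.map_cons, List.map_map, pvPairs]
    refine congrArg₂ _ (by simp) ?_
    rw [← ih (s + 1)]
    refine List.map_congr_left fun k _ => ?_
    simp only [Function.comp, Nat.succ_eq_add_one, List.getD_cons_succ]
    congr 1
    push_cast
    ring

theorem pvPairs_zero_eq (cs : List Char) (d : Char) :
    (List.range cs.length).map (fun k => (cs.getD k d, (k : Int))) = pvPairs cs 0 := by
  rw [← pvPairs_eq_map_range cs d 0]
  exact List.map_congr_left fun k _ => by simp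

theorem pvIdxs_eq_filter_map (cs : List Char) (s : Int) (c : Char) :
    ((pvPairs cs s).filter (fun p => p.1 == c)).map (fun p => p.2) = pvIdxs cs s c := by
  induction cs generalizing s with
  | nil => simp [pvPairs, pvIdxs]
  | cons x t ih =>
    by_cases h : x = c <;> simp [pvPairs, pvIdxs, h, ih]

theorem pvPairs_mem_fst {cs : List Char} {s : Int} {p : Char × Int} (h : p ∈ pvPairs cs s) : p.1 ∈ cs := by
  induction cs generalizing s with
  | nil => simp [pvPairs] at h
  | cons x t ih =>
    simp only [pvPairs, List.mem_cons] at h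
    rcases h with h | h
    · subst h; simp
    · exact List.mem_cons_of_mem _ (ih h)

theorem pvPairs_mem_snd {cs : List Char} {s : Int} {p : Char × Int} (h : p ∈ pvPairs cs s) : s ≤ p.2 := by
  induction cs generalizing s with
  | nil => simp [pvPairs] at h
  | cons x t ih =>
    simp only [pvPairs, List.mem_cons] at h
    rcases h with h | h
    · subst h; simp
    · have := ih h; omega

theorem pvPairs_pairwise_snd (cs : List Char) (s : Int) :
    (pvPairs cs s).Pairwise (fun p q => p.2 < q.2) := by
  induction cs generalizing s with
  | nil => exact List.Pairwise.nil
  | cons x t ih =>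
    refine List.Pairwise.cons (fun q hq => ?_) (ih (s + 1))
    have := pvPairs_mem_snd hq
    simp only
    omega

-- a list of pairs is, up to permutation, the concatenation of its per-first-component blocks
theorem pvFlatMap_filter_perm (K : List Char) (P : List (Char × Int))
    (hK : K.Pairwise (· < ·)) (hm : ∀ p ∈ P, p.1 ∈ K) :
    (K.flatMap (fun c => P.filter (fun p => p.1 == c))).Perm P := by
  induction K generalizing P with
  | nil =>
    have hP : P = [] := by
      cases P with
      | nil => rfl
      | cons q t => exact absurd (hm q List.mem_cons_self) (by simp)
    simp [hP]
  | cons c K' ih =>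
    have hcK' : ∀ c' ∈ K', c ≠ c' := fun c' hc' => ne_of_lt (List.rel_of_pairwise_cons hK hc')
    have htail : K'.flatMap (fun c' => P.filter (fun p => p.1 == c')) =
        K'.flatMap (fun c' => (P.filter (fun p => !(p.1 == c))).filter (fun p => p.1 == c')) := by
      refine List.flatMap_congr (fun c' hc' => ?_)
      rw [List.filter_filter]
      refine List.filter_congr fun p _ => ?_
      by_cases hp : p.1 = c'
      · have : ¬ (p.1 = c) := fun hc => (hcK' c' hc') (hc ▸ hp)
        simp [hp]
        exact fun hc => this (hp ▸ hc)
      · simp [hp]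
    have hmem : ∀ p ∈ P.filter (fun p => !(p.1 == c)), p.1 ∈ K' := by
      intro p hp
      rw [List.mem_filter] at hp
      have := hm p hp.1
      simp only [List.mem_cons] at this
      rcases this with h | h
      · exfalso; revert hp; simp [h]
      · exact h
    rw [List.flatMap_cons, htail]
    exact (List.Perm.append_left _ (ih _ (List.Pairwise.of_cons hK) hmem)).trans
      (List.filter_append_perm _ P)

-- the block concatenation is lexicographically strictly increasing
theorem pvFlatMap_pairwise_lex (K : List Char) (P : List (Char × Int))
    (hK : K.Pairwise (· < ·)) (hP : P.Pairwise (fun p q => p.2 < q.2)) :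
    (K.flatMap (fun c => P.filter (fun p => p.1 == c))).Pairwise
      (fun p q => toLex (p.1, p.2) < toLex (q.1, q.2)) := by
  induction K with
  | nil => exact List.Pairwise.nil
  | cons c K' ih =>
    rw [List.flatMap_cons, List.pairwise_append]
    refine ⟨?_, ih (List.Pairwise.of_cons hK), ?_⟩
    · refine List.Pairwise.imp_of_mem (fun {p q} hp hq hlt => ?_) (List.Pairwise.sublist List.filter_sublist hP)
      have hp1 : p.1 = c := by simpa using (List.mem_filter.mp hp).2
      have hq1 : q.1 = c := by simpa using (List.mem_filter.mp hq).2
      rw [Prod.Lex.lt_iff]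
      exact Or.inr ⟨by simp [hp1, hq1], hlt⟩
    · intro p hp q hq
      have hp1 : p.1 = c := by simpa using (List.mem_filter.mp hp).2
      rcases List.mem_flatMap.mp hq with ⟨c', hc', hq'⟩
      have hq1 : q.1 = c' := by simpa using (List.mem_filter.mp hq').2
      rw [Prod.Lex.lt_iff]
      refine Or.inl ?_
      show p.1 < q.1
      rw [hp1, hq1]
      exact List.rel_of_pairwise_cons hK hc' 

-- sorted2 with two keys is sorted with the lexicographic key
theorem pvSorted2_eq_sorted_lex {α κ₁ κ₂ : Type} [LinearOrder κ₁] [LinearOrder κ₂]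
    (xs : List α) (k1 : α → κ₁) (k2 : α → κ₂) :
    PySem.List.sorted2 xs k1 k2 = PySem.List.sorted xs (fun x => toLex (k1 x, k2 x)) := by
  have hb : (fun a b => decide (k1 a < k1 b) || (!decide (k1 b < k1 a) && decide (k2 a < k2 b)))
      = (fun a b : α => decide ((toLex (k1 a, k2 a)) < toLex (k1 b, k2 b))) := by
    funext a b
    rcases lt_trichotomy (k1 a) (k1 b) with h | h | h
    · simp [Prod.Lex.lt_iff, h, not_lt_of_gt h, ne_of_lt h]
    · simp [Prod.Lex.lt_iff, h]
    · simp [Prod.Lex.lt_iff, h, not_lt_of_gt h, (ne_of_lt h).symm]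
  simp only [PySem.List.sorted2, PySem.List.sorted, if_neg (by simp : ¬(false = true)), hb]

theorem pvKeys_insert {κ ν : Type} [BEq κ] [LawfulBEq κ] (d : PySem.Dict κ ν) (k : κ) (v : ν) :
    (d.insert k v).keys = PySem.Set.add d.keys k := by
  simp only [PySem.Dict.insert, PySem.Dict.keys, PySem.Set.add, PySem.Dict.contains, PySem.Set.contains]
  by_cases h : d.items.any (fun p => p.1 == k)
  · simp only [h, if_true, List.map_map]
    have hc : List.contains (d.items.map (fun x => x.1)) k = true := by
      simp only [List.any_eq_true] at h
      rcases h with ⟨p, hp, hpk⟩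
      simp only [List.contains_eq_mem, decide_eq_true_eq, List.mem_map]
      exact ⟨p, hp, eq_of_beq hpk⟩
    rw [hc]; simp only [if_true]
    refine List.map_congr_left fun p _ => ?_
    by_cases hpk : (p.1 == k) <;> simp [hpk, Function.comp]
    exact (eq_of_beq hpk).symm
  · simp only [h, if_false, Bool.false_eq_true]
    have hc : List.contains (d.items.map (fun x => x.1)) k = false := by
      simp only [List.any_eq_true] at h
      simp only [List.contains_eq_mem, decide_eq_false_iff_not, List.mem_map]
      rintro ⟨p, hp, hk⟩
      exact h ⟨p, hp, beq_iff_eq.mpr hk⟩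
    rw [hc]; simp

-- B's bucket dictionary: lookups
theorem pvBuckets_getD (cs : List Char) (s : Int) (d : PySem.Dict Char (List Int)) (c : Char) :
    (((PySem.List.enumerate cs s).foldl
        (fun d p => d.modify p.2 [] (fun l => l ++ [p.1])) d).getD c [])
      = d.getD c [] ++ pvIdxs cs s c := by
  induction cs generalizing s d with
  | nil => simp [pvIdxs, PySem.List.enumerate]
  | cons x t ih =>
    rw [PySem.List.enumerate_cons, List.foldl_cons, ih]
    by_cases h : c = x
    · subst h
      rw [PySem.Dict.getD_modify_self]
      simp [pvIdxs]
    · rw [PySem.Dict.getD_modify_of_ne _ _ _ h]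
      have hn : ¬ (x = c) := fun hxc => h hxc.symm
      simp [pvIdxs, hn]

-- B's bucket dictionary: keys in first-occurrence order
theorem pvBuckets_keys (cs : List Char) (s : Int) (d : PySem.Dict Char (List Int)) :
    ((PySem.List.enumerate cs s).foldl
        (fun d p => d.modify p.2 [] (fun l => l ++ [p.1])) d).keys
      = PySem.Set.update d.keys cs := by
  induction cs generalizing s d with
  | nil => simp [PySem.Set.update, PySem.List.enumerate]
  | cons x t ih =>
    rw [PySem.List.enumerate_cons, List.foldl_cons, ih]
    simp only [PySem.Set.update, List.foldl_cons]
    rw [PySem.Dict.keys_modify, pvKeys_insert]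

-- ===== VERDICT (by name: the statement is the Claim_ definition above) =====
theorem get_sorted_indices_spec : Claim_equal_get_sorted_indices := by
  intro key _
  unfold Spec_get_sorted_indices get_sorted_indices get_sorted_indices_alt
  simp only
  set cs := key.toList with hcs
  -- normalise A's first loop into pvPairs cs 0
  rw [PySem.List.foldl_append_singleton_eq_map (fun idx => (PySem.List.pyGetD cs idx ' ', idx)),
      List.nil_append, PySem.Str.len_eq, PySem.List.pyRange_zero_nat]
  rw [List.map_map]
  have h1 : (List.range cs.length).map
      ((fun idx => (PySem.List.pyGetD cs idx ' ', idx)) ∘ (fun k : Nat => (k : Int)))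
      = pvPairs cs 0 := by
    rw [← pvPairs_zero_eq cs ' ']
    exact List.map_congr_left fun k _ => by simp [Function.comp]
  rw [h1]
  -- B's buckets
  have hkeys : ((PySem.List.enumerate cs 0).foldl
      (fun d p => d.modify p.2 [] (fun l => l ++ [p.1])) PySem.Dict.empty).keys
      = PySem.Set.ofList cs := by
    rw [pvBuckets_keys, PySem.Set.ofList_eq_foldl]
    rfl
  rw [hkeys]
  set K := PySem.List.sorted (PySem.Set.ofList cs) (fun c => c) with hK
  -- A's sort equals the block concatenation over K
  have hKlt : K.Pairwise (· < ·) := PySem.List.sorted_ofList_pairwise_lt cs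
  have hsort : PySem.List.sorted2 (pvPairs cs 0) (fun p => p.1) (fun p => p.2)
      = K.flatMap (fun c => (pvPairs cs 0).filter (fun p => p.1 == c)) := by
    rw [pvSorted2_eq_sorted_lex]
    refine PySem.List.sorted_eq_of_perm_of_pairwise_lt _ _ _ ?_ ?_
    · exact pvFlatMap_filter_perm K (pvPairs cs 0) hKlt (fun p hp => by
        rw [hK, PySem.List.mem_sorted, PySem.Set.mem_ofList]
        exact pvPairs_mem_fst hp)
    · exact pvFlatMap_pairwise_lex K (pvPairs cs 0) hKlt (pvPairs_pairwise_snd cs 0)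
  rw [hsort]
  -- collapse both final loops
  rw [PySem.List.foldl_append_singleton_eq_map (fun pair : Char × Int => pair.2), List.nil_append]
  rw [PySem.List.foldl_append_eq_flatMap, List.nil_append]
  rw [List.map_flatMap]
  refine List.flatMap_congr fun c _ => ?_
  rw [pvIdxs_eq_filter_map, pvBuckets_getD]
  simp
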